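-- pv_equiv track=rewrite | github.com/P0wir/roguelike | roguelike.py | generate_map_vampire_style
-- ===== SOURCE A (Python) =====
-- def generate_map_vampire_style(width, height):
--     """
--     Generuje mapę w stylu Vampire Survivors:
--     - Krawędzie mapy (skały) jako '1'.
--     - Wnętrze mapy (trawa) jako '0'.
--     """
--     game_map = []
--
--     for y in range(height):
--         row = []
--         for x in range(width):
--             if x == 0 or x == width - 1 or y == 0 or y == height - 1:
--                 row.append(1)  # Skały na krawędziach
--             else:
--                 row.append(0)  # Trawa w środku
--         game_map.append(row)
--
--     return game_map
-- ===== SOURCE B (Python) =====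
-- def generate_map_vampire_style(width, height):
--     # Allocate the whole grid as zeros, then paint the border in separate passes.
--     grid = [[0] * width for _ in range(height)]
--     if width > 0 and height > 0:
--         for x in range(width):
--             grid[0][x] = 1
--             grid[height - 1][x] = 1
--         for y in range(height):
--             grid[y][0] = 1
--             grid[y][width - 1] = 1
--     return grid
-- ===== Notes on version B (the rewrite author's own statement) =====
-- stated objective: alternative
-- what changed: Instead of deciding border-vs-interior per cell inside a nested loop, B allocates the whole grid as zeros in one bulk comprehension and then paints only the perimeter in two separate passes (top/bottom rows, then left/right columns), so no per-cell boundary test is performed.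
import Mathlib
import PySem

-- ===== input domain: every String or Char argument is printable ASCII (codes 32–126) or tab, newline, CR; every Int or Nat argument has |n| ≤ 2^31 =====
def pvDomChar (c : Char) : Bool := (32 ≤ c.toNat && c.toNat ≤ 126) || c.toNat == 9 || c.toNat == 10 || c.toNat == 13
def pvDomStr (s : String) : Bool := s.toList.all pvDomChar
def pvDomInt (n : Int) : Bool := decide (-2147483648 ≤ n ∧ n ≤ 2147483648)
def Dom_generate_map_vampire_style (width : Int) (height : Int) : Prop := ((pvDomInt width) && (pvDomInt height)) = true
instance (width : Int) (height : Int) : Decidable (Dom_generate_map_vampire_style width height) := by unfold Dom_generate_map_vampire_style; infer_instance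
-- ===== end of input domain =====

-- B allocates the whole grid as zeros in one bulk step and then paints only the perimeter in
-- two separate passes (top/bottom rows, then left/right columns) instead of A's per-cell test.

-- ===== PORT A =====
def generate_map_vampire_style (width : Int) (height : Int) : List (List Int) :=
  (PySem.List.pyRange 0 height 1).foldl (fun game_map y =>
    game_map ++ [(PySem.List.pyRange 0 width 1).foldl (fun row x =>
      if x = 0 ∨ x = width - 1 ∨ y = 0 ∨ y = height - 1 then row ++ [(1 : Int)]
      else row ++ [(0 : Int)]) []]) []

-- ===== PORT B =====
-- one Python assignment 'grid[r][c] = 1' (B only uses it with indices in range)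
def pvSetCell (g : List (List Int)) (r c : Nat) : List (List Int) :=
  g.set r ((g.getD r []).set c 1)

def generate_map_vampire_style_alt (width : Int) (height : Int) : List (List Int) :=
  -- grid = [[0]*width for _ in range(height)]
  let grid := (List.range height.toNat).map (fun _ => List.replicate width.toNat (0 : Int))
  if 0 < width ∧ 0 < height then
    let grid := (PySem.List.pyRange 0 width 1).foldl
      (fun g x => pvSetCell (pvSetCell g 0 x.toNat) (height - 1).toNat x.toNat) grid
    (PySem.List.pyRange 0 height 1).foldl
      (fun g y => pvSetCell (pvSetCell g y.toNat 0) y.toNat (width - 1).toNat) grid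
  else grid

-- ===== PRECONDITION & SPEC =====
def Spec_generate_map_vampire_style (width : Int) (height : Int) (out : List (List Int)) : Prop := out = generate_map_vampire_style_alt width height
instance (width : Int) (height : Int) (out : List (List Int)) : Decidable (Spec_generate_map_vampire_style width height out) := by unfold Spec_generate_map_vampire_style; infer_instance

-- ===== CLAIM (what is proved, stated in full; the proofs are below) =====
def Claim_equal_generate_map_vampire_style : Prop := ∀ (width : Int) (height : Int), Dom_generate_map_vampire_style width height → Spec_generate_map_vampire_style width height (generate_map_vampire_style width height)

-- ===== LEMMAS AND PROOFS =====

-- cell (i, j) of a grid, the way the proofs read it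
def pvCell (g : List (List Int)) (i j : Nat) : Int := (g.getD i []).getD j 0

-- grid shape: h rows, each of length w
def pvShape (g : List (List Int)) (h w : Nat) : Prop :=
  g.length = h ∧ ∀ i, i < h → (g.getD i []).length = w

theorem pvGetD_set {α : Type} (l : List α) (r : Nat) (v : α) (i : Nat) (d : α) :
    (l.set r v).getD i d = if r = i ∧ r < l.length then v else l.getD i d := by
  simp only [List.getD_eq_getElem?_getD, List.getElem?_set]
  split_ifs with h1 h2 h3 h3 <;> simp_all <;> omega

theorem pvShape_setCell {g : List (List Int)} {h w : Nat} (hg : pvShape g h w)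
    (r c : Nat) : pvShape (pvSetCell g r c) h w := by
  obtain ⟨hl, hr⟩ := hg
  refine ⟨by simp [pvSetCell, hl], ?_⟩
  intro i hi
  unfold pvSetCell
  rw [pvGetD_set]
  split_ifs with hcase
  · rw [List.length_set]; exact hcase.1 ▸ hr i hi
  · exact hr i hi

theorem pvCell_setCell {g : List (List Int)} {h w : Nat} (hg : pvShape g h w)
    {r c : Nat} (hrh : r < h) (hcw : c < w) (i j : Nat) :
    pvCell (pvSetCell g r c) i j = if i = r ∧ j = c then 1 else pvCell g i j := by
  obtain ⟨hl, hrow⟩ := hg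
  unfold pvCell pvSetCell
  rw [pvGetD_set]
  by_cases hri : r = i
  · have hrl : r < g.length := hl ▸ hrh
    rw [if_pos ⟨hri, hrl⟩, pvGetD_set]
    have hcl : c < (g.getD r []).length := (hrow r hrh) ▸ hcw
    by_cases hcj : c = j
    · rw [if_pos ⟨hcj, hcl⟩, if_pos ⟨hri.symm, hcj.symm⟩]
    · rw [if_neg (by tauto), if_neg (by tauto), hri]
  · rw [if_neg (by tauto), if_neg (by tauto)]

-- first pass: painting column x of rows 0 and h-1 for each x ∈ xs
theorem pvFold1 (h w : Nat) (hh : 0 < h) :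
    ∀ (xs : List Int) (g : List (List Int)), pvShape g h w →
      (∀ x ∈ xs, 0 ≤ x ∧ x < (w : Int)) →
      pvShape (xs.foldl (fun g x => pvSetCell (pvSetCell g 0 x.toNat) (h - 1) x.toNat) g) h w ∧
      ∀ i j, pvCell (xs.foldl (fun g x => pvSetCell (pvSetCell g 0 x.toNat) (h - 1) x.toNat) g) i j
        = if (i = 0 ∨ i = h - 1) ∧ (∃ x ∈ xs, x = (j : Int)) then 1 else pvCell g i j := by
  intro xs
  induction xs with
  | nil => intro g hg _; refine ⟨hg, ?_⟩; intro i j; simp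
  | cons x xs ih =>
    intro g hg hx
    have hx0 := hx x (by simp)
    have hxw : x.toNat < w := by omega
    have hg1 := pvShape_setCell hg 0 x.toNat
    have hg2 := pvShape_setCell hg1 (h - 1) x.toNat
    have hxs : ∀ x' ∈ xs, 0 ≤ x' ∧ x' < (w : Int) := fun x' hx' => hx x' (by simp [hx'])
    obtain ⟨ihs, ihc⟩ := ih _ hg2 hxs
    refine ⟨by simpa using ihs, ?_⟩
    intro i j
    simp only [List.foldl_cons]
    rw [ihc i j, pvCell_setCell hg1 (by omega) hxw i j, pvCell_setCell hg hh hxw i j]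
    have hxj : (j = x.toNat) = (x = (j : Int)) := propext (by omega)
    have hcons : (∃ x' ∈ x :: xs, x' = (j : Int))
        = (x = (j : Int) ∨ ∃ x' ∈ xs, x' = (j : Int)) := propext (by simp [eq_comm])
    simp only [hxj, hcons]
    by_cases hR : x = (j : Int) <;> by_cases hQ : ∃ x' ∈ xs, x' = (j : Int) <;>
      by_cases hP1 : i = 0 <;> by_cases hP2 : i = h - 1 <;> simp [hR, hQ, hP1, hP2]

-- second pass: painting columns 0 and w-1 of row y for each y ∈ ys
theorem pvFold2 (h w : Nat) (hw : 0 < w) :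
    ∀ (ys : List Int) (g : List (List Int)), pvShape g h w →
      (∀ y ∈ ys, 0 ≤ y ∧ y < (h : Int)) →
      pvShape (ys.foldl (fun g y => pvSetCell (pvSetCell g y.toNat 0) y.toNat (w - 1)) g) h w ∧
      ∀ i j, pvCell (ys.foldl (fun g y => pvSetCell (pvSetCell g y.toNat 0) y.toNat (w - 1)) g) i j
        = if (∃ y ∈ ys, y = (i : Int)) ∧ (j = 0 ∨ j = w - 1) then 1 else pvCell g i j := by
  intro ys
  induction ys with
  | nil => intro g hg _; refine ⟨hg, ?_⟩; intro i j; simp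
  | cons y ys ih =>
    intro g hg hy
    have hy0 := hy y (by simp)
    have hyh : y.toNat < h := by omega
    have hg1 := pvShape_setCell hg y.toNat 0
    have hg2 := pvShape_setCell hg1 y.toNat (w - 1)
    have hys : ∀ y' ∈ ys, 0 ≤ y' ∧ y' < (h : Int) := fun y' hy' => hy y' (by simp [hy'])
    obtain ⟨ihs, ihc⟩ := ih _ hg2 hys
    refine ⟨by simpa using ihs, ?_⟩
    intro i j
    simp only [List.foldl_cons]
    rw [ihc i j, pvCell_setCell hg1 hyh (by omega) i j, pvCell_setCell hg hyh hw i j]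
    have hyi : (i = y.toNat) = (y = (i : Int)) := propext (by omega)
    have hcons : (∃ y' ∈ y :: ys, y' = (i : Int))
        = (y = (i : Int) ∨ ∃ y' ∈ ys, y' = (i : Int)) := propext (by simp [eq_comm])
    simp only [hyi, hcons]
    by_cases hR : y = (i : Int) <;> by_cases hQ : ∃ y' ∈ ys, y' = (i : Int) <;>
      by_cases hP1 : j = 0 <;> by_cases hP2 : j = w - 1 <;> simp [hR, hQ, hP1, hP2]

theorem pvShape_init (h w : Nat) :
    pvShape (List.replicate h (List.replicate w (0 : Int))) h w := by
  refine ⟨by simp, ?_⟩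
  intro i hi
  rw [List.getD_eq_getElem _ _ (by simpa using hi)]
  simp

theorem pvCell_init (h w : Nat) (i j : Nat) :
    pvCell (List.replicate h (List.replicate w (0 : Int))) i j = 0 := by
  unfold pvCell
  simp only [List.getD_eq_getElem?_getD, List.getElem?_replicate]
  split_ifs <;> simp

theorem pvGetElem_eq_cell (g : List (List Int)) (i j : Nat) (h2 : i < g.length)
    (h4 : j < (g[i]'h2).length) : (g[i]'h2)[j]'h4 = pvCell g i j := by
  unfold pvCell
  rw [List.getD_eq_getElem _ _ h2, List.getD_eq_getElem _ _ h4]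

-- an append-accumulating fold builds the map of its body
theorem pvFoldlApp {α β : Type} (f : α → β) :
    ∀ (l : List α) (acc : List β),
      l.foldl (fun g y => g ++ [f y]) acc = acc ++ l.map f := by
  intro l
  induction l with
  | nil => intro acc; simp
  | cons a l ih => intro acc; simp [ih, List.append_assoc]

-- an append-accumulating fold whose body is a branch builds the map of the branched value
theorem pvFoldlIfApp {α β : Type} (c : α → Prop) [DecidablePred c] (r1 r2 : α → β) :
    ∀ (l : List α) (acc : List β),
      l.foldl (fun g y => if c y then g ++ [r1 y] else g ++ [r2 y]) acc
        = acc ++ l.map (fun y => if c y then r1 y else r2 y) := by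
  intro l
  induction l with
  | nil => intro acc; simp
  | cons a l ih =>
    intro acc
    by_cases h : c a <;> simp [h, ih, List.append_assoc]

-- A as a map of maps
theorem pvA_eq_map (width height : Int) :
    generate_map_vampire_style width height
      = (PySem.List.pyRange 0 height 1).map (fun y =>
          (PySem.List.pyRange 0 width 1).map (fun x =>
            if x = 0 ∨ x = width - 1 ∨ y = 0 ∨ y = height - 1 then (1 : Int) else 0)) := by
  unfold generate_map_vampire_style
  rw [pvFoldlApp]
  simp only [List.nil_append]
  apply List.map_congr_left
  intro y _
  simpa using pvFoldlIfApp (fun x => x = 0 ∨ x = width - 1 ∨ y = 0 ∨ y = height - 1)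
    (fun _ => (1 : Int)) (fun _ => (0 : Int)) (PySem.List.pyRange 0 width 1) []

-- ===== VERDICT (by name: the statement is the Claim_ definition above) =====
theorem generate_map_vampire_style_spec : Claim_equal_generate_map_vampire_style := by
  intro width height _
  unfold Spec_generate_map_vampire_style
  rw [pvA_eq_map]
  by_cases hwh : 0 < width ∧ 0 < height
  · obtain ⟨hw, hh⟩ := hwh
    have hh' : 0 < height.toNat := by omega
    have hw' : 0 < width.toNat := by omega
    have hheq : (height - 1).toNat = height.toNat - 1 := by omega
    have hweq : (width - 1).toNat = width.toNat - 1 := by omega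
    have halt : generate_map_vampire_style_alt width height
        = (PySem.List.pyRange 0 height 1).foldl
            (fun g y => pvSetCell (pvSetCell g y.toNat 0) y.toNat (width.toNat - 1))
            ((PySem.List.pyRange 0 width 1).foldl
              (fun g x => pvSetCell (pvSetCell g 0 x.toNat) (height.toNat - 1) x.toNat)
              (List.replicate height.toNat (List.replicate width.toNat (0 : Int)))) := by
      simp only [generate_map_vampire_style_alt, hheq, hweq,
        if_pos (show 0 < width ∧ 0 < height from ⟨hw, hh⟩)]
      rw [List.map_const', List.length_range]
    rw [halt]
    obtain ⟨hs1, hc1⟩ := pvFold1 height.toNat width.toNat hh' (PySem.List.pyRange 0 width 1)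
      (List.replicate height.toNat (List.replicate width.toNat (0 : Int)))
      (pvShape_init height.toNat width.toNat)
      (by intro x hx; rw [PySem.List.mem_pyRange_one] at hx; omega)
    obtain ⟨hs2, hc2⟩ := pvFold2 height.toNat width.toNat hw' (PySem.List.pyRange 0 height 1) _
      hs1 (by intro y hy; rw [PySem.List.mem_pyRange_one] at hy; omega)
    apply List.ext_getElem
    · rw [List.length_map, PySem.List.length_pyRange_one, hs2.1]; omega
    · intro i h1 h2
      have hih : i < height.toNat := hs2.1 ▸ h2
      apply List.ext_getElem
      · rw [List.getElem_map, List.length_map, PySem.List.length_pyRange_one,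
            ← List.getD_eq_getElem _ [] h2, hs2.2 i hih]
        omega
      · intro j h3 h4
        have hjw : j < width.toNat := by
          have hrow := hs2.2 i hih
          rw [List.getD_eq_getElem _ [] h2] at hrow
          omega
        rw [pvGetElem_eq_cell _ i j h2 h4, hc2 i j, hc1 i j, pvCell_init]
        simp only [List.getElem_map, PySem.List.getElem_pyRange_one,
          PySem.List.mem_pyRange_one]
        have hex1 : (∃ y ∈ PySem.List.pyRange 0 height 1, y = (i : Int)) ↔
            (0 ≤ (i : Int) ∧ (i : Int) < height) := by
          simp [PySem.List.mem_pyRange_one]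
        have hex2 : (∃ x ∈ PySem.List.pyRange 0 width 1, x = (j : Int)) ↔
            (0 ≤ (j : Int) ∧ (j : Int) < width) := by
          simp [PySem.List.mem_pyRange_one]
        simp only [hex1, hex2]
        clear hex1 hex2 halt hs1 hs2 hc1 hc2 h1 h2 h3 h4
        split_ifs <;> omega
  · have halt : generate_map_vampire_style_alt width height
        = List.replicate height.toNat (List.replicate width.toNat (0 : Int)) := by
      unfold generate_map_vampire_style_alt
      simp only [if_neg hwh]
      rw [List.map_const', List.length_range]
    rw [halt]
    by_cases hhn : height ≤ 0
    · rw [PySem.List.pyRange_one_eq_nil hhn]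
      simp [Int.toNat_of_nonpos hhn]
    · have hwn : width ≤ 0 := by omega
      simp only [PySem.List.pyRange_one_eq_nil hwn, List.map_nil,
        Int.toNat_of_nonpos hwn, List.replicate_zero]
      refine List.eq_replicate_iff.mpr ⟨?_, ?_⟩
      · rw [List.length_map, PySem.List.length_pyRange_one]; omega
      · intro r hr
        rcases List.mem_map.mp hr with ⟨y, _, rfl⟩
        rfl
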